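-- pv_equiv track=rewrite | github.com/CS4091/Team_R_REPO | capstone2-clientapi/new_alg.py | get_sensor_footprint
-- ===== SOURCE A (Python) =====
-- ORIENTATIONS = ["UP", "RIGHT", "DOWN", "LEFT"]
--
-- def get_sensor_footprint(position, orientation):
--     """
--     Given the aircraft's position (row, col) and orientation, compute the sensor footprint.
--     The sensor covers a 2x3 rectangle ahead of the aircraft.
--     We assume the sensor rectangle is placed immediately in front of the aircraft.
--     """
--     row, col = position
--     footprint = []
--     # Relative coordinates for a 2x3 rectangle with the aircraft at the bottom center when facing North.
--     # We'll define it for the North orientation and then rotate for other directions.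
--     # For North: rectangle is two rows high, three columns wide, in front of the aircraft.
--     rel_coords = [(0, -1), (0, 0), (0, 1),
--                   (-1, -1), (-1, 0), (-1, 1)]
--
--     # Rotate relative coordinates based on orientation
--     def rotate(coord, orientation):
--         r, c = coord
--         # 90 degrees clockwise rotation
--         for _ in range(ORIENTATIONS.index(orientation)):
--             r, c = c, -r
--         return (r, c)
--
--     for rel in rel_coords:
--         dr, dc = rotate(rel, orientation)
--         footprint.append((row + dr, col + dc))
--     return footprint
-- ===== SOURCE B (Python) =====
-- ORIENTATIONS = ["UP", "RIGHT", "DOWN", "LEFT"]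
--
-- # Closed-form rotation per orientation instead of iterating the quarter-turn step.
-- _ROT = {
--     "UP":    lambda r, c: (r, c),
--     "RIGHT": lambda r, c: (c, -r),
--     "DOWN":  lambda r, c: (-r, -c),
--     "LEFT":  lambda r, c: (-c, r),
-- }
--
-- def get_sensor_footprint(position, orientation):
--     row, col = position
--     rot = _ROT[orientation]
--     return [(row + dr, col + dc)
--             for dr, dc in (rot(r, c) for r, c in
--                            [(0, -1), (0, 0), (0, 1), (-1, -1), (-1, 0), (-1, 1)])]
-- ===== Notes on version B (the rewrite author's own statement) =====
-- stated objective: simpler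
-- what changed: Replaces the per-offset quarter-turn loop (index into ORIENTATIONS, then rotate k times) by a closed-form rotation map indexed by orientation, applied once to each fixed offset.
import Mathlib
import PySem

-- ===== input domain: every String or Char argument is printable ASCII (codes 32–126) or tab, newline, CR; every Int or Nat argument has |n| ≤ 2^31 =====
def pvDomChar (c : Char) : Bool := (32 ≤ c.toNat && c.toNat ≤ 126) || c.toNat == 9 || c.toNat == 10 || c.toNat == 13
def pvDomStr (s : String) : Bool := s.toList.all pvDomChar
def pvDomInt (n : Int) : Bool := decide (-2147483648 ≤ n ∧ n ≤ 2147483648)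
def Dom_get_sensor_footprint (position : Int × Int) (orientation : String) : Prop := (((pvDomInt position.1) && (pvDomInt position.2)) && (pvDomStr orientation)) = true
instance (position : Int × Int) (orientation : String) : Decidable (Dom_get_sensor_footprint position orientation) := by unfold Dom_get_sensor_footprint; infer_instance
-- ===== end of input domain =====

-- B replaces A's iterated quarter-turn loop by a closed-form rotation map per orientation (objective: simpler).

-- ===== PORT A =====
def ORIENTATIONS : List String := ["UP", "RIGHT", "DOWN", "LEFT"]

def rel_coords : List (Int × Int) :=
  [(0, -1), (0, 0), (0, 1), (-1, -1), (-1, 0), (-1, 1)]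

-- rotate(coord, orientation): iterate (r, c) := (c, -r) index-many times
def rotateA (coord : Int × Int) (k : Nat) : Int × Int :=
  (List.range k).foldl (fun (p : Int × Int) _ => (p.2, -p.1)) coord

def get_sensor_footprint (position : Int × Int) (orientation : String) : List (Int × Int) :=
  match PySem.List.index? ORIENTATIONS orientation with
  | none => []  -- ValueError in Python: excluded by Pre_
  | some k =>
    rel_coords.foldl (fun acc rel =>
      let d := rotateA rel k
      acc ++ [(position.1 + d.1, position.2 + d.2)]) []

-- ===== PORT B =====
-- _ROT dict of closed-form rotations, as a lookup
def rotB? (orientation : String) : Option ((Int × Int) → (Int × Int)) :=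
  if orientation == "UP" then some (fun p => (p.1, p.2))
  else if orientation == "RIGHT" then some (fun p => (p.2, -p.1))
  else if orientation == "DOWN" then some (fun p => (-p.1, -p.2))
  else if orientation == "LEFT" then some (fun p => (-p.2, p.1))
  else none

def get_sensor_footprint_alt (position : Int × Int) (orientation : String) : List (Int × Int) :=
  match rotB? orientation with
  | none => []  -- KeyError in Python: excluded by Pre_
  | some rot =>
    (rel_coords.map rot).map (fun d => (position.1 + d.1, position.2 + d.2))

-- ===== PRECONDITION & SPEC =====
-- Pre_ excludes exactly the orientations absent from ORIENTATIONS, on which A raises ValueError (and B raises KeyError).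
def Pre_get_sensor_footprint (_position : Int × Int) (orientation : String) : Prop :=
  orientation ∈ ORIENTATIONS
instance (position : Int × Int) (orientation : String) : Decidable (Pre_get_sensor_footprint position orientation) := by unfold Pre_get_sensor_footprint; infer_instance

def pvWitness_get_sensor_footprint : (Int × Int) × String := ((2, 3), "RIGHT")

def Spec_get_sensor_footprint (position : Int × Int) (orientation : String) (out : List (Int × Int)) : Prop := out = get_sensor_footprint_alt position orientation
instance (position : Int × Int) (orientation : String) (out : List (Int × Int)) : Decidable (Spec_get_sensor_footprint position orientation out) := by unfold Spec_get_sensor_footprint; infer_instance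

-- ===== CLAIM =====
def Claim_equal_get_sensor_footprint : Prop := ∀ (position : Int × Int) (orientation : String), Dom_get_sensor_footprint position orientation → Pre_get_sensor_footprint position orientation → Spec_get_sensor_footprint position orientation (get_sensor_footprint position orientation)

-- ===== LEMMAS AND PROOFS =====

-- ===== VERDICT =====
theorem get_sensor_footprint_spec : Claim_equal_get_sensor_footprint := by
  intro position orientation _ hpre
  unfold Pre_get_sensor_footprint ORIENTATIONS at hpre
  unfold Spec_get_sensor_footprint
  obtain ⟨row, col⟩ := position
  simp only [List.mem_cons, List.not_mem_nil, or_false] at hpre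
  rcases hpre with h | h | h | h <;> subst h <;>
    simp [get_sensor_footprint, get_sensor_footprint_alt, ORIENTATIONS, rel_coords,
      rotateA, rotB?, PySem.List.index?, List.idxOf?, List.findIdx?, List.findIdx?.go, List.range_succ]
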